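-- pv_equiv track=rewrite | github.com/mehrdadhalali/Advent-Of-Code | 2021/day_5.py | get_points_of_intersection
-- ===== SOURCE A (Python) =====
-- def get_points_of_intersection(lines: list[set]) -> set:
--     """Returns a set of all of the points of intersection of the lines."""
--
--     n = len(lines)
--
--     points_of_intersection = set({})
--
--     for i in range(0, n-1):
--         for j in range(i+1, n):
--             points = set((lines[i]).intersection(lines[j]))
--             points_of_intersection = points_of_intersection.union(points)
--
--     return points_of_intersection
-- ===== SOURCE B (Python) =====
-- def get_points_of_intersection(lines: list[set]) -> set:
--     """Returns a set of all of the points of intersection of the lines."""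
--     hits = []
--     rest = list(lines)
--     while rest:
--         head = rest.pop(0)
--         hits.extend(p for b in rest for p in head & b)
--     return set(hits)
-- ===== Notes on version B (the rewrite author's own statement) =====
-- stated objective: simpler
-- what changed: Replaces the index-based double loop that builds a fresh intersection set and a fresh union set at every pair with a consume-the-head worklist that collects all pairwise hits into one flat list and deduplicates once with a single set() at the end; the constant-factor win comes from eliminating the per-pair temporary set objects and repeated union copies.
import Mathlib
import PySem

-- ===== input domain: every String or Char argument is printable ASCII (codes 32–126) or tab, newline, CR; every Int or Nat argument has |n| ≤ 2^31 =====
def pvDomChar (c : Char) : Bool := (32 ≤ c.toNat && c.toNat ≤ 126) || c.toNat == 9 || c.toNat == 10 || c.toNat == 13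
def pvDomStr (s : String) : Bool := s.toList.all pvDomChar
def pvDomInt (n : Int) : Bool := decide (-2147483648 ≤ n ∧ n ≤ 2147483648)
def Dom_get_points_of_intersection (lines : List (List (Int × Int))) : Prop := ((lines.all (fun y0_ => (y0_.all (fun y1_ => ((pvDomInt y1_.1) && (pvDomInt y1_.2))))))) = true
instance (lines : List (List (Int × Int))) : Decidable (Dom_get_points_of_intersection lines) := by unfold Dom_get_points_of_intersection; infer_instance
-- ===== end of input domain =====

-- B replaces A's index-driven double loop of per-pair set unions by a consume-the-head
-- worklist that collects all pairwise hits into one flat list deduplicated by a single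
-- set() at the end (objective: simpler; same asymptotic cost).

-- ===== PORT A =====
def get_points_of_intersection (lines : List (List (Int × Int))) : List (Int × Int) :=
  let n : Int := lines.length
  (PySem.List.pyRange 0 (n - 1) 1).foldl
    (fun acc i =>
      (PySem.List.pyRange (i + 1) n 1).foldl
        (fun acc j =>
          let points := PySem.Set.ofList
            (PySem.Set.inter (PySem.List.pyGetD lines i []) (PySem.List.pyGetD lines j []))
          PySem.Set.union acc points)
        acc)
    PySem.Set.empty

-- ===== PORT B =====
-- 'while rest: head = rest.pop(0); hits.extend(p for b in rest for p in head & b)'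
-- → structural recursion on the worklist `rest`, threading the `hits` accumulator.
def pvAltLoop (rest : List (List (Int × Int))) (hits : List (Int × Int)) : List (Int × Int) :=
  match rest with
  | [] => hits
  | head :: rest' => pvAltLoop rest' (hits ++ rest'.flatMap (fun b => PySem.Set.inter head b))

def get_points_of_intersection_alt (lines : List (List (Int × Int))) : List (Int × Int) :=
  PySem.Set.ofList (pvAltLoop lines [])

-- ===== PRECONDITION & SPEC =====
def Spec_get_points_of_intersection (lines : List (List (Int × Int))) (out : List (Int × Int)) : Prop := out = get_points_of_intersection_alt lines
instance (lines : List (List (Int × Int))) (out : List (Int × Int)) : Decidable (Spec_get_points_of_intersection lines out) := by unfold Spec_get_points_of_intersection; infer_instance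

-- ===== CLAIM (what is proved, stated in full; the proofs are below) =====
def Claim_equal_get_points_of_intersection : Prop := ∀ (lines : List (List (Int × Int))), Dom_get_points_of_intersection lines → Spec_get_points_of_intersection lines (get_points_of_intersection lines)

-- ===== LEMMAS AND PROOFS =====

-- the flat list of all pairwise-intersection hits, pair-major in lexicographic order
def pvPairs : List (List (Int × Int)) → List (Int × Int)
  | [] => []
  | a :: t => t.flatMap (fun b => PySem.Set.inter a b) ++ pvPairs t

-- folding Set.add over a list already dedup-folded from acc is folding it over acc ++ xs
lemma pv_update_foldl_add {α : Type} [BEq α] [LawfulBEq α] :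
    ∀ (xs acc : List α) (s : PySem.Set α),
      PySem.Set.update s (xs.foldl PySem.Set.add acc) = PySem.Set.update s (acc ++ xs)
  | [], acc, s => by simp
  | x :: xs, acc, s => by
    rw [List.foldl_cons, pv_update_foldl_add xs (PySem.Set.add acc x) s]
    by_cases h : x ∈ acc
    · rw [PySem.Set.add_of_mem h]
      have hx : x ∈ List.foldl PySem.Set.add s acc := (PySem.Set.mem_update s acc x).mpr (Or.inr h)
      simp only [PySem.Set.update, List.foldl_append, List.foldl_cons, PySem.Set.add_of_mem hx]
    · rw [PySem.Set.add_of_not_mem h, List.append_assoc]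
      rfl

-- update by set(xs) is update by xs
lemma pv_update_ofList {α : Type} [BEq α] [LawfulBEq α] (s : PySem.Set α) (xs : List α) :
    PySem.Set.update s (PySem.Set.ofList xs) = PySem.Set.update s xs := by
  simpa using pv_update_foldl_add xs [] s

-- a fold of per-element updates is one update by the flattened list
lemma pv_foldl_update {α β : Type} [BEq α] (l : List β) (f : β → List α) :
    ∀ s : PySem.Set α,
      l.foldl (fun acc x => PySem.Set.update acc (f x)) s = PySem.Set.update s (l.flatMap f) := by
  induction l with
  | nil => intro s; simp [PySem.Set.update]
  | cons x t ih =>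
    intro s
    rw [List.foldl_cons, ih, List.flatMap_cons]
    simp [PySem.Set.update, List.foldl_append]

lemma pvAltLoop_eq : ∀ (rest : List (List (Int × Int))) (hits : List (Int × Int)),
    pvAltLoop rest hits = hits ++ pvPairs rest
  | [], hits => by simp [pvAltLoop, pvPairs]
  | head :: rest', hits => by
    rw [pvAltLoop, pvAltLoop_eq rest', pvPairs, List.append_assoc]

lemma pvB_eq (lines : List (List (Int × Int))) :
    get_points_of_intersection_alt lines = PySem.Set.update [] (pvPairs lines) := by
  simp [get_points_of_intersection_alt, pvAltLoop_eq, PySem.Set.ofList, PySem.Set.update,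
    PySem.Set.empty]

-- A's double index loop flattens to pvPairs on the suffix it still has to visit
lemma pvA_chunks (lines : List (List (Int × Int))) :
    ∀ (ys : List (List (Int × Int))) (k : Nat), lines.drop k = ys →
      (PySem.List.pyRange (k : Int) ((lines.length : Int) - 1) 1).flatMap
        (fun i => (PySem.List.pyRange (i + 1) (lines.length : Int) 1).flatMap
          (fun j => PySem.Set.inter (PySem.List.pyGetD lines i [])
            (PySem.List.pyGetD lines j [])))
      = pvPairs ys := by
  intro ys
  induction ys with
  | nil =>
    intro k h
    have hk : lines.length ≤ k := by
      by_contra hc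
      exact absurd h (by simp [List.drop_eq_nil_iff]; omega)
    rw [PySem.List.pyRange_one_eq_nil (by omega)]
    simp [pvPairs]
  | cons a t ih =>
    intro k h
    have hk : k < lines.length := by
      by_contra hc
      rw [List.drop_eq_nil_of_le (by omega)] at h
      simp at h
    have ht : lines.drop (k + 1) = t := by
      have : lines.drop (k + 1) = (lines.drop k).drop 1 := by rw [List.drop_drop]
      rw [this, h]; rfl
    have ha : PySem.List.pyGetD lines (k : Int) ([] : List (Int × Int)) = a := by
      rw [PySem.List.pyGetD_natCast, List.getD_eq_getElem?_getD]
      have : lines[k]? = some a := by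
        have h0 : (lines.drop k)[0]? = some a := by rw [h]; rfl
        rw [List.getElem?_drop] at h0
        simpa using h0
      rw [this]; rfl
    by_cases hlast : lines.length ≤ k + 1
    · have ht0 : t = [] := by rw [← ht]; exact List.drop_eq_nil_of_le hlast
      rw [PySem.List.pyRange_one_eq_nil (by omega), ht0]
      simp [pvPairs]
    · rw [PySem.List.pyRange_one_cons (by omega), List.flatMap_cons]
      have hchunk :
          (PySem.List.pyRange ((k : Int) + 1) (lines.length : Int) 1).flatMap
            (fun j => PySem.Set.inter (PySem.List.pyGetD lines (k : Int) [])
              (PySem.List.pyGetD lines j []))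
          = t.flatMap (fun b => PySem.Set.inter a b) := by
        rw [ha, ← List.flatMap_map (fun j => PySem.List.pyGetD lines j ([] : List (Int × Int)))
          (fun b => PySem.Set.inter a b),
          PySem.List.map_pyGetD_pyRange' lines ([] : List (Int × Int)) (by omega)]
        have : ((k : Int) + 1).toNat = k + 1 := by omega
        rw [this, ht]
      rw [hchunk]
      have hcast : (k : Int) + 1 = ((k + 1 : Nat) : Int) := by push_cast; ring
      rw [pvPairs, hcast, ih (k + 1) ht]

lemma pvA_eq (lines : List (List (Int × Int))) :
    get_points_of_intersection lines = PySem.Set.update [] (pvPairs lines) := by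
  unfold get_points_of_intersection
  have hinner : ∀ (i : Int) (acc : PySem.Set (Int × Int)),
      (PySem.List.pyRange (i + 1) (lines.length : Int) 1).foldl
        (fun acc j => PySem.Set.union acc (PySem.Set.ofList
          (PySem.Set.inter (PySem.List.pyGetD lines i []) (PySem.List.pyGetD lines j [])))) acc
      = PySem.Set.update acc ((PySem.List.pyRange (i + 1) (lines.length : Int) 1).flatMap
          (fun j => PySem.Set.inter (PySem.List.pyGetD lines i [])
            (PySem.List.pyGetD lines j []))) := by
    intro i acc
    have hbody : (fun (acc : PySem.Set (Int × Int)) (j : Int) => PySem.Set.union acc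
        (PySem.Set.ofList (PySem.Set.inter (PySem.List.pyGetD lines i [])
          (PySem.List.pyGetD lines j []))))
        = fun acc j => PySem.Set.update acc
            (PySem.Set.inter (PySem.List.pyGetD lines i []) (PySem.List.pyGetD lines j [])) := by
      funext acc j
      exact pv_update_ofList acc _
    rw [hbody, pv_foldl_update]
  simp only [hinner]
  rw [pv_foldl_update (PySem.List.pyRange 0 ((lines.length : Int) - 1) 1)
    (fun i => (PySem.List.pyRange (i + 1) (lines.length : Int) 1).flatMap
      (fun j => PySem.Set.inter (PySem.List.pyGetD lines i []) (PySem.List.pyGetD lines j [])))]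
  have h0 : (0 : Int) = ((0 : Nat) : Int) := rfl
  rw [h0, pvA_chunks lines lines 0 rfl]
  rfl

-- ===== VERDICT (by name: the statement is the Claim_ definition above) =====
theorem get_points_of_intersection_spec : Claim_equal_get_points_of_intersection := by
  intro lines _
  unfold Spec_get_points_of_intersection
  rw [pvA_eq, pvB_eq]
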